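-- pv_equiv track=rewrite | github.com/hamzayogurtcuoglu/CSE321-Algorithm-Design-and-Analyzes | Hw5/homework5.py | calculateCountOfAlignment
-- ===== SOURCE A (Python) =====
-- def calculateCountOfAlignment(interval, resultA, resultB, n,l):
--     matchCount = 0
--     misMatchCount = 0
--     gapCount = 0
--     BCount = 0
--     A = ""
--     B = ""
--     for i in range (interval,l+1):
--         if(chr(resultB[i]) == '-'):
--             if BCount<n:
--                 gapCount = gapCount + 1
--                 B = B + chr(resultB[i])
--             A = A + chr(resultA[i])
--         else:
--             if resultA[i] == resultB[i]:
--                 matchCount = matchCount + 1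
--                 B = B + chr(resultB[i])
--                 A = A + chr(resultA[i])
--             else:
--                 misMatchCount = misMatchCount + 1
--                 B = B + chr(resultB[i])
--                 A = A + chr(resultA[i])
--             BCount = BCount + 1
--     return misMatchCount,matchCount,gapCount,A,B
-- ===== SOURCE B (Python) =====
-- def calculateCountOfAlignment(interval, resultA, resultB, n, l):
--     idxs = range(interval, l + 1)
--     # pass 1: the aligned A string is just the characters of resultA over the window
--     A = ''.join(chr(resultA[i]) for i in idxs)
--     # pass 2: match/mismatch counts come from the non-gap positions only
--     matchCount = 0
--     misMatchCount = 0
--     for i in idxs: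
--         if chr(resultB[i]) != '-':
--             if resultA[i] == resultB[i]:
--                 matchCount += 1
--             else:
--                 misMatchCount += 1
--     # pass 3: build B and count gaps, tracking how many non-gap chars precede each gap
--     gapCount = 0
--     seen = 0
--     parts = []
--     for i in idxs:
--         c = chr(resultB[i])
--         if c != '-':
--             parts.append(c)
--             seen += 1
--         elif seen < n:
--             gapCount += 1
--             parts.append(c)
--     return misMatchCount, matchCount, gapCount, A, ''.join(parts)
-- ===== Notes on version B (the rewrite author's own statement) =====
-- stated objective: alternative
-- what changed: Replaces A's single fused loop carrying six pieces of state by three independent passes over the window: a join builds the A string, one pass counts matches/mismatches over non-gap positions only, and one pass builds B and the capped gap count with its own running non-gap counter.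
import Mathlib
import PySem

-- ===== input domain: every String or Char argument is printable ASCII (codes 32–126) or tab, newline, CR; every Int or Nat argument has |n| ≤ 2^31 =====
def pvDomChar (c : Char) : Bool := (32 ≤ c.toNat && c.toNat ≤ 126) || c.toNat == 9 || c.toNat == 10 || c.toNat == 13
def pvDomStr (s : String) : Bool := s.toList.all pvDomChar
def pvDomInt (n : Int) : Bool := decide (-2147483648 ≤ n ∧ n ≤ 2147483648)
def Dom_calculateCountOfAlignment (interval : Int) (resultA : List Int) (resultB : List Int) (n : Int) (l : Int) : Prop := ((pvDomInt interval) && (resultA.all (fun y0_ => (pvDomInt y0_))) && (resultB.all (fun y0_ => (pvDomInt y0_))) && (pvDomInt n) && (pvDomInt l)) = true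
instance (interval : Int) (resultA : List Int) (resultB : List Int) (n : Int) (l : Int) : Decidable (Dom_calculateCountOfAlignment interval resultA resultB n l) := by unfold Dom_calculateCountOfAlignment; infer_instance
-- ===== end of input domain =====

-- B restructures A's single six-state loop into three independent passes (join for A, a count
-- pass over non-gap positions, a gap/B pass with its own non-gap counter); same cost, different
-- decomposition ('alternative').

-- ===== PORT A =====
-- xs[i] as the raw int (total form; Pre_ guarantees the index is in range)
def pvGetI (xs : List Int) (i : Int) : Int := (PySem.List.pyGet? xs i).getD 0
-- chr(xs[i]) (exact for valid non-surrogate code points, which Pre_ guarantees)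
def pvChr (xs : List Int) (i : Int) : Char := Char.ofNat (pvGetI xs i).toNat

def calculateCountOfAlignment (interval : Int) (resultA : List Int) (resultB : List Int) (n : Int) (l : Int) : Int × Int × Int × String × String :=
  let s := (PySem.List.pyRange interval (l+1) 1).foldl
    (fun (st : Int × Int × Int × Int × List Char × List Char) i =>
      if pvChr resultB i = '-' then
        if st.2.2.2.1 < n then
          (st.1, st.2.1, st.2.2.1 + 1, st.2.2.2.1, st.2.2.2.2.1 ++ [pvChr resultA i], st.2.2.2.2.2 ++ [pvChr resultB i])
        else
          (st.1, st.2.1, st.2.2.1, st.2.2.2.1, st.2.2.2.2.1 ++ [pvChr resultA i], st.2.2.2.2.2)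
      else
        if pvGetI resultA i = pvGetI resultB i then
          (st.1, st.2.1 + 1, st.2.2.1, st.2.2.2.1 + 1, st.2.2.2.2.1 ++ [pvChr resultA i], st.2.2.2.2.2 ++ [pvChr resultB i])
        else
          (st.1 + 1, st.2.1, st.2.2.1, st.2.2.2.1 + 1, st.2.2.2.2.1 ++ [pvChr resultA i], st.2.2.2.2.2 ++ [pvChr resultB i]))
    (0, 0, 0, 0, [], [])
  (s.1, s.2.1, s.2.2.1, String.mk s.2.2.2.2.1, String.mk s.2.2.2.2.2)

-- ===== PORT B =====
-- pass 2 of Source B: (matchCount, misMatchCount) over the non-gap positions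
def pvCountsB (resultA resultB : List Int) (r : List Int) : Int × Int :=
  r.foldl (fun (p : Int × Int) i =>
      if pvChr resultB i ≠ '-' then
        if pvGetI resultA i = pvGetI resultB i then (p.1 + 1, p.2) else (p.1, p.2 + 1)
      else p)
    (0, 0)

-- pass 3 of Source B: (gapCount, seen, parts)
def pvGapB (resultB : List Int) (n : Int) (r : List Int) : Int × Int × List Char :=
  r.foldl (fun (s : Int × Int × List Char) i =>
      let c := pvChr resultB i
      if c ≠ '-' then (s.1, s.2.1 + 1, s.2.2 ++ [c])
      else if s.2.1 < n then (s.1 + 1, s.2.1, s.2.2 ++ [c])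
      else s)
    (0, 0, [])

def calculateCountOfAlignment_alt (interval : Int) (resultA : List Int) (resultB : List Int) (n : Int) (l : Int) : Int × Int × Int × String × String :=
  let r := PySem.List.pyRange interval (l+1) 1
  let A := String.mk (r.map (fun i => pvChr resultA i))
  let cnt := pvCountsB resultA resultB r
  let g := pvGapB resultB n r
  (cnt.2, cnt.1, g.1, A, String.mk g.2.2)

-- ===== PRECONDITION & SPEC =====
-- xs[i] exists and is a chr-able, non-surrogate code point
def pvOkAt (xs : List Int) (i : Int) : Bool :=
  match PySem.List.pyGet? xs i with
  | some c => decide (0 ≤ c) && (decide (c < 55296) || (decide (57343 < c) && decide (c < 1114112)))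
  | none => false

-- A raises IndexError when some i in range(interval, l+1) is out of range of either list, and
-- ValueError on chr of a negative or > 0x10FFFF code; besides those crashes, Pre_ also excludes
-- surrogate code points 0xD800–0xDFFF, on which A returns a string that Lean's Char cannot represent.
def Pre_calculateCountOfAlignment (interval : Int) (resultA : List Int) (resultB : List Int) (n : Int) (l : Int) : Prop :=
  interval ≤ l →
    (-(PySem.List.len resultA) ≤ interval ∧ l < PySem.List.len resultA ∧
     -(PySem.List.len resultB) ≤ interval ∧ l < PySem.List.len resultB ∧
     ∀ i ∈ PySem.List.pyRange interval (l+1) 1, pvOkAt resultA i = true ∧ pvOkAt resultB i = true)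
instance (interval : Int) (resultA : List Int) (resultB : List Int) (n : Int) (l : Int) : Decidable (Pre_calculateCountOfAlignment interval resultA resultB n l) := by unfold Pre_calculateCountOfAlignment; infer_instance

def pvWitness_calculateCountOfAlignment : Int × List Int × List Int × Int × Int := (0, [97, 45], [45, 97], 1, 1)

def Spec_calculateCountOfAlignment (interval : Int) (resultA : List Int) (resultB : List Int) (n : Int) (l : Int) (out : Int × Int × Int × String × String) : Prop := out = calculateCountOfAlignment_alt interval resultA resultB n l
instance (interval : Int) (resultA : List Int) (resultB : List Int) (n : Int) (l : Int) (out : Int × Int × Int × String × String) : Decidable (Spec_calculateCountOfAlignment interval resultA resultB n l out) := by unfold Spec_calculateCountOfAlignment; infer_instance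

-- ===== CLAIM (what is proved, stated in full; the proofs are below) =====
def Claim_equal_calculateCountOfAlignment : Prop := ∀ (interval : Int) (resultA : List Int) (resultB : List Int) (n : Int) (l : Int), Dom_calculateCountOfAlignment interval resultA resultB n l → Pre_calculateCountOfAlignment interval resultA resultB n l → Spec_calculateCountOfAlignment interval resultA resultB n l (calculateCountOfAlignment interval resultA resultB n l)

-- ===== LEMMAS AND PROOFS =====

-- A's fused fold is the three B-side folds, for every accumulator state
theorem pv_fold_split (resultA resultB : List Int) (n : Int) :
    ∀ (r : List Int) (mm mc gc bc : Int) (A B : List Char),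
      r.foldl
        (fun (st : Int × Int × Int × Int × List Char × List Char) i =>
          if pvChr resultB i = '-' then
            if st.2.2.2.1 < n then
              (st.1, st.2.1, st.2.2.1 + 1, st.2.2.2.1, st.2.2.2.2.1 ++ [pvChr resultA i], st.2.2.2.2.2 ++ [pvChr resultB i])
            else
              (st.1, st.2.1, st.2.2.1, st.2.2.2.1, st.2.2.2.2.1 ++ [pvChr resultA i], st.2.2.2.2.2)
          else
            if pvGetI resultA i = pvGetI resultB i then
              (st.1, st.2.1 + 1, st.2.2.1, st.2.2.2.1 + 1, st.2.2.2.2.1 ++ [pvChr resultA i], st.2.2.2.2.2 ++ [pvChr resultB i])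
            else
              (st.1 + 1, st.2.1, st.2.2.1, st.2.2.2.1 + 1, st.2.2.2.2.1 ++ [pvChr resultA i], st.2.2.2.2.2 ++ [pvChr resultB i]))
        (mm, mc, gc, bc, A, B)
      =
      ((r.foldl
          (fun (p : Int × Int) i =>
            if pvChr resultB i ≠ '-' then
              if pvGetI resultA i = pvGetI resultB i then (p.1 + 1, p.2) else (p.1, p.2 + 1)
            else p)
          (mc, mm)).2,
       (r.foldl
          (fun (p : Int × Int) i =>
            if pvChr resultB i ≠ '-' then
              if pvGetI resultA i = pvGetI resultB i then (p.1 + 1, p.2) else (p.1, p.2 + 1)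
            else p)
          (mc, mm)).1,
       (r.foldl
          (fun (s : Int × Int × List Char) i =>
            let c := pvChr resultB i
            if c ≠ '-' then (s.1, s.2.1 + 1, s.2.2 ++ [c])
            else if s.2.1 < n then (s.1 + 1, s.2.1, s.2.2 ++ [c])
            else s)
          (gc, bc, B)).1,
       (r.foldl
          (fun (s : Int × Int × List Char) i =>
            let c := pvChr resultB i
            if c ≠ '-' then (s.1, s.2.1 + 1, s.2.2 ++ [c])
            else if s.2.1 < n then (s.1 + 1, s.2.1, s.2.2 ++ [c])
            else s)
          (gc, bc, B)).2.1,
       A ++ r.map (fun i => pvChr resultA i),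
       (r.foldl
          (fun (s : Int × Int × List Char) i =>
            let c := pvChr resultB i
            if c ≠ '-' then (s.1, s.2.1 + 1, s.2.2 ++ [c])
            else if s.2.1 < n then (s.1 + 1, s.2.1, s.2.2 ++ [c])
            else s)
          (gc, bc, B)).2.2) := by
  intro r
  induction r with
  | nil => intro mm mc gc bc A B; simp [List.foldl]
  | cons i r ih =>
    intro mm mc gc bc A B
    by_cases hc : pvChr resultB i = '-'
    · by_cases hb : bc < n
      · simp [List.foldl, hc, hb, ih]
      · simp [List.foldl, hc, hb, ih]
    · by_cases he : pvGetI resultA i = pvGetI resultB i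
      · simp [List.foldl, hc, he, ih]
      · simp [List.foldl, hc, he, ih]

-- ===== VERDICT (by name: the statement is the Claim_ definition above) =====
theorem calculateCountOfAlignment_spec : Claim_equal_calculateCountOfAlignment := by
  intro interval resultA resultB n l _hDom _hPre
  unfold Spec_calculateCountOfAlignment calculateCountOfAlignment calculateCountOfAlignment_alt
  simp only [pv_fold_split, pvGapB, pvCountsB, List.nil_append]
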